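-- pv_equiv track=rewrite | github.com/Sheewi/aiux | complete_system_integration.py | _extract_clarity_indicators
-- ===== SOURCE A (Python) =====
-- from typing import Dict, List, Any, Optional, Union, Tuple
--
-- def _extract_clarity_indicators(user_input: str) -> Dict[str, int]:
--     """Extract clarity indicators from input"""
--     text_lower = user_input.lower()
--
--     return {
--         'specific_terms': len([w for w in text_lower.split() if len(w) > 6]),
--         'technical_terms': len([w for w in text_lower.split() if w in ['api', 'database', 'algorithm', 'framework', 'system']]),
--         'action_verbs': len([w for w in text_lower.split() if w in ['create', 'build', 'implement', 'design', 'develop']]),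
--         'quantifiers': len([w for w in text_lower.split() if w in ['all', 'every', 'each', 'some', 'many', 'few']])
--     }
-- ===== SOURCE B (Python) =====
-- def _extract_clarity_indicators(user_input: str) -> dict:
--     """Extract clarity indicators from input (single pass over the words)."""
--     technical = {'api', 'database', 'algorithm', 'framework', 'system'}
--     actions = {'create', 'build', 'implement', 'design', 'develop'}
--     quants = {'all', 'every', 'each', 'some', 'many', 'few'}
--     specific_terms = technical_terms = action_verbs = quantifiers = 0
--     for w in user_input.lower().split():
--         if len(w) > 6:
--             specific_terms += 1
--         if w in technical:
--             technical_terms += 1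
--         if w in actions:
--             action_verbs += 1
--         if w in quants:
--             quantifiers += 1
--     return {
--         'specific_terms': specific_terms,
--         'technical_terms': technical_terms,
--         'action_verbs': action_verbs,
--         'quantifiers': quantifiers,
--     }
-- ===== Notes on version B (the rewrite author's own statement) =====
-- stated objective: simpler
-- what changed: B splits the lowered input once and tallies all four categories in a single pass with four independent counters, instead of A's four separate split+filter comprehensions over the text.
import Mathlib
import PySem

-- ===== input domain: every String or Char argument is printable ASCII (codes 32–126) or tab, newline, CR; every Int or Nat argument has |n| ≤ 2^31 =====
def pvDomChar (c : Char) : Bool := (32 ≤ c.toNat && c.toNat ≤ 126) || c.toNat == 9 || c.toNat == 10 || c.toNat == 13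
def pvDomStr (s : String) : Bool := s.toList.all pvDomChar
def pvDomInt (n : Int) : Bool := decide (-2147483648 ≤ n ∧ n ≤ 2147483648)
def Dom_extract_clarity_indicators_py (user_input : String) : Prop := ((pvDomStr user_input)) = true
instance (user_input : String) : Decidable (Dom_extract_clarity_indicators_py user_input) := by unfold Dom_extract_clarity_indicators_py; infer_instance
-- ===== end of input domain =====

-- B replaces A's four split+filter comprehensions with one split and a single-pass fold over the words with four independent counters (objective: simpler).
-- ===== PORT A =====
-- A: four separate split+filter comprehensions (literal transliteration).
def extract_clarity_indicators_py (user_input : String) : List (String × Int) :=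
  let text_lower := PySem.Str.lower user_input
  [("specific_terms", (((PySem.Str.split₀ text_lower).filter (fun w => decide (6 < PySem.Str.len w))).length : Int)),
   ("technical_terms", (((PySem.Str.split₀ text_lower).filter (fun w => ["api", "database", "algorithm", "framework", "system"].contains w)).length : Int)),
   ("action_verbs", (((PySem.Str.split₀ text_lower).filter (fun w => ["create", "build", "implement", "design", "develop"].contains w)).length : Int)),
   ("quantifiers", (((PySem.Str.split₀ text_lower).filter (fun w => ["all", "every", "each", "some", "many", "few"].contains w)).length : Int))]

-- ===== PORT B =====
-- B: split once, one pass with four independent counters.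
def extract_clarity_indicators_py_alt (user_input : String) : List (String × Int) :=
  let step : (Int × Int × Int × Int) → String → (Int × Int × Int × Int) := fun acc w =>
    let s := if 6 < PySem.Str.len w then acc.1 + 1 else acc.1
    let t := if ["api", "database", "algorithm", "framework", "system"].contains w then acc.2.1 + 1 else acc.2.1
    let a := if ["create", "build", "implement", "design", "develop"].contains w then acc.2.2.1 + 1 else acc.2.2.1
    let q := if ["all", "every", "each", "some", "many", "few"].contains w then acc.2.2.2 + 1 else acc.2.2.2
    (s, t, a, q)
  let r := ((PySem.Str.split₀ (PySem.Str.lower user_input)).foldl step (0, 0, 0, 0))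
  [("specific_terms", r.1), ("technical_terms", r.2.1), ("action_verbs", r.2.2.1), ("quantifiers", r.2.2.2)]

-- ===== PRECONDITION & SPEC =====
def Spec_extract_clarity_indicators_py (user_input : String) (out : List (String × Int)) : Prop := out = extract_clarity_indicators_py_alt user_input
instance (user_input : String) (out : List (String × Int)) : Decidable (Spec_extract_clarity_indicators_py user_input out) := by unfold Spec_extract_clarity_indicators_py; infer_instance

-- ===== CLAIM (what is proved, stated in full; the proofs are below) =====
def Claim_equal_extract_clarity_indicators_py : Prop := ∀ (user_input : String), Dom_extract_clarity_indicators_py user_input → Spec_extract_clarity_indicators_py user_input (extract_clarity_indicators_py user_input)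

-- ===== LEMMAS AND PROOFS =====
-- Invariant of B's single pass: the 4-tuple fold adds the four category counts to the start state.
theorem pv_fold4 (l : List String) (a b c d : Int) :
    l.foldl (fun acc w =>
      ((if 6 < PySem.Str.len w then acc.1 + 1 else acc.1),
       (if ["api", "database", "algorithm", "framework", "system"].contains w then acc.2.1 + 1 else acc.2.1),
       (if ["create", "build", "implement", "design", "develop"].contains w then acc.2.2.1 + 1 else acc.2.2.1),
       (if ["all", "every", "each", "some", "many", "few"].contains w then acc.2.2.2 + 1 else acc.2.2.2))) (a, b, c, d)
    = (a + (l.filter (fun w => decide (6 < PySem.Str.len w))).length,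
       b + (l.filter (fun w => ["api", "database", "algorithm", "framework", "system"].contains w)).length,
       c + (l.filter (fun w => ["create", "build", "implement", "design", "develop"].contains w)).length,
       d + (l.filter (fun w => ["all", "every", "each", "some", "many", "few"].contains w)).length) := by
  induction l generalizing a b c d with
  | nil => simp
  | cons x xs ih =>
    simp only [List.foldl_cons, ih, List.filter_cons, decide_eq_true_eq]
    split_ifs <;> simp <;> omega

-- ===== VERDICT (by name: the statement is the Claim_ definition above) =====
theorem extract_clarity_indicators_py_spec : Claim_equal_extract_clarity_indicators_py := by
  intro u _
  unfold Spec_extract_clarity_indicators_py extract_clarity_indicators_py extract_clarity_indicators_py_alt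
  simp only [pv_fold4, zero_add]
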